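-- pv_equiv track=rewrite | github.com/esethuraman/SearchEngine | ProximitySearch/RelaxedProximitySearch.py | get_doc_frqncy_dict
-- ===== SOURCE A (Python) =====
-- def get_doc_frqncy_dict(inv_indx_dict, all_docs_set, query_terms_lst):
--     doc_frqncy_dict = {}
--     for doc_id in all_docs_set:
--         overall_terms_frequency = 0
--         for q_term in query_terms_lst:
--             if q_term in inv_indx_dict.keys():
--                 if doc_id in inv_indx_dict[q_term].keys():
--                     this_qterm_frqncy = len(inv_indx_dict[q_term][doc_id])
--                     overall_terms_frequency += this_qterm_frqncy
--         doc_frqncy_dict[doc_id] = overall_terms_frequency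
--
--     sorted_dict = sorted
--     return doc_frqncy_dict
-- ===== SOURCE B (Python) =====
-- def get_doc_frqncy_dict(inv_indx_dict, all_docs_set, query_terms_lst):
--     doc_frqncy_dict = dict.fromkeys(all_docs_set, 0)
--     for q_term in query_terms_lst:
--         postings = inv_indx_dict.get(q_term)
--         if postings is None:
--             continue
--         for doc_id, positions in postings.items():
--             if doc_id in doc_frqncy_dict:
--                 doc_frqncy_dict[doc_id] += len(positions)
--     return doc_frqncy_dict
-- ===== Notes on version B (the rewrite author's own statement) =====
-- stated objective: faster
-- what changed: Instead of re-scanning the whole query-term list (with two dict lookups each) for every document, B initialises every document's count to 0 with dict.fromkeys and then makes one pass over each query term's posting dict, accumulating len(positions) into the matching document's slot.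
import Mathlib
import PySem

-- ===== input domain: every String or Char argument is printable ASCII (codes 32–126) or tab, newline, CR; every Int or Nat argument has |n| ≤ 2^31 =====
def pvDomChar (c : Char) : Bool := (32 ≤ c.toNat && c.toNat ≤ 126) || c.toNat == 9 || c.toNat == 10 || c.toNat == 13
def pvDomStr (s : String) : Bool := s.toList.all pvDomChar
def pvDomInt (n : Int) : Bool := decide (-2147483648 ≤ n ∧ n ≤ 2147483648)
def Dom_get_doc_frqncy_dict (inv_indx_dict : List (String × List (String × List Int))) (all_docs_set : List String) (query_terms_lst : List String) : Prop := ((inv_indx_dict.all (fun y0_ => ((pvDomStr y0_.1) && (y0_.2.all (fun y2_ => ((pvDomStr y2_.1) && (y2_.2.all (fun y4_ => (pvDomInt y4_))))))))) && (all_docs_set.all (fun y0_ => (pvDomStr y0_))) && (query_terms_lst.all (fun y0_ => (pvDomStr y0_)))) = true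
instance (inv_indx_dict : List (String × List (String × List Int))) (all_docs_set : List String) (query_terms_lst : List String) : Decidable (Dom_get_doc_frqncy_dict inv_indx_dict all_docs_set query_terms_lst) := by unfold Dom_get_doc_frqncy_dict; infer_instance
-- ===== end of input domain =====

-- B replaces A's per-document scan over all query terms (with a dict lookup each time) by
-- initialising every document's count to 0 and then accumulating each query term's posting
-- lists once — O(|docs| + Σ_q |postings(q)|) instead of O(|docs|·|terms|); same return value.


-- ===== PORT A =====
-- Literal port of A: for each doc, re-scan the whole query-term list, looking each term up
-- in the inverted index and, if present, the doc in its posting dict; insert the sum.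
def get_doc_frqncy_dict (inv_indx_dict : List (String × List (String × List Int))) (all_docs_set : List String) (query_terms_lst : List String) : List (String × Int) :=
  (all_docs_set.foldl (fun d doc_id =>
    d.insert doc_id
      (query_terms_lst.foldl (fun acc q_term =>
        if (PySem.Dict.mk inv_indx_dict).contains q_term then
          (if (PySem.Dict.mk ((PySem.Dict.mk inv_indx_dict).getD q_term [])).contains doc_id then
            acc + (((PySem.Dict.mk ((PySem.Dict.mk inv_indx_dict).getD q_term [])).getD doc_id []).length : Int)
          else acc)
        else acc) 0)) PySem.Dict.empty).items

-- ===== PORT B =====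
-- inner loop of B: for doc_id, positions in postings.items(): if doc_id in dict: dict[doc_id] += len(positions)
def pvBInner (d : PySem.Dict String Int) (postings : List (String × List Int)) : PySem.Dict String Int :=
  postings.foldl (fun d p =>
    if d.contains p.1 then d.modify p.1 0 (fun v => v + (p.2.length : Int)) else d) d

-- one q_term of B's outer loop: postings = inv_indx_dict.get(q_term); skip if None
def pvBStep (inv_indx_dict : List (String × List (String × List Int))) (d : PySem.Dict String Int) (q_term : String) : PySem.Dict String Int :=
  match (PySem.Dict.mk inv_indx_dict).get? q_term with
  | none => d
  | some postings => pvBInner d postings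

def get_doc_frqncy_dict_alt (inv_indx_dict : List (String × List (String × List Int))) (all_docs_set : List String) (query_terms_lst : List String) : List (String × Int) :=
  (query_terms_lst.foldl (pvBStep inv_indx_dict)
    (all_docs_set.foldl (fun d doc_id => d.insert doc_id (0 : Int)) PySem.Dict.empty)).items

-- ===== PRECONDITION & SPEC =====
-- Pre_ excludes association lists with duplicate keys in the outer inverted index or in one of
-- its posting dicts: such lists do not represent a Python dict (a Python dict cannot hold
-- duplicate keys, so A never sees such an input; first-match vs last-match there is arbitrary).
def Pre_get_doc_frqncy_dict (inv_indx_dict : List (String × List (String × List Int))) (all_docs_set : List String) (query_terms_lst : List String) : Prop :=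
  (inv_indx_dict.map Prod.fst).Nodup ∧ ∀ p ∈ inv_indx_dict, (p.2.map Prod.fst).Nodup
instance (inv_indx_dict : List (String × List (String × List Int))) (all_docs_set : List String) (query_terms_lst : List String) : Decidable (Pre_get_doc_frqncy_dict inv_indx_dict all_docs_set query_terms_lst) := by unfold Pre_get_doc_frqncy_dict; infer_instance

def pvWitness_get_doc_frqncy_dict : (List (String × List (String × List Int))) × List String × List String :=
  ([("cat", [("d1", [0, 4]), ("d2", [7])]), ("dog", [("d2", [1])])], ["d1", "d2", "d3"], ["cat", "dog", "bird"])

def Spec_get_doc_frqncy_dict (inv_indx_dict : List (String × List (String × List Int))) (all_docs_set : List String) (query_terms_lst : List String) (out : List (String × Int)) : Prop := out = get_doc_frqncy_dict_alt inv_indx_dict all_docs_set query_terms_lst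
instance (inv_indx_dict : List (String × List (String × List Int))) (all_docs_set : List String) (query_terms_lst : List String) (out : List (String × Int)) : Decidable (Spec_get_doc_frqncy_dict inv_indx_dict all_docs_set query_terms_lst out) := by unfold Spec_get_doc_frqncy_dict; infer_instance

-- ===== CLAIM (what is proved, stated in full; the proofs are below) =====
def Claim_equal_get_doc_frqncy_dict : Prop := ∀ (inv_indx_dict : List (String × List (String × List Int))) (all_docs_set : List String) (query_terms_lst : List String), Dom_get_doc_frqncy_dict inv_indx_dict all_docs_set query_terms_lst → Pre_get_doc_frqncy_dict inv_indx_dict all_docs_set query_terms_lst → Spec_get_doc_frqncy_dict inv_indx_dict all_docs_set query_terms_lst (get_doc_frqncy_dict inv_indx_dict all_docs_set query_terms_lst)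

-- ===== LEMMAS AND PROOFS =====

-- the contribution of one query term to one document's count
def pvTermAdd (inv_indx_dict : List (String × List (String × List Int))) (q : String) (k : String) : Int :=
  match (PySem.Dict.mk inv_indx_dict).get? q with
  | none => 0
  | some postings => (postings.map (fun p => if p.1 = k then (p.2.length : Int) else 0)).sum

theorem pv_sum_zero_of_not_mem (k : String) (l : List (String × List Int)) (h : k ∉ l.map Prod.fst) :
    (l.map (fun p => if p.1 = k then (p.2.length : Int) else 0)).sum = 0 := by
  induction l with
  | nil => simp
  | cons p rest ih =>
    simp only [List.map_cons, List.mem_cons, not_or] at h ⊢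
    rw [List.sum_cons, if_neg (fun hk => h.1 hk.symm), ih h.2, add_zero]

-- A's guarded lookup equals the filtered sum, when the posting dict has no duplicate keys
theorem pv_lookup_eq_sum (k : String) (l : List (String × List Int)) (h : (l.map Prod.fst).Nodup) :
    (if (PySem.Dict.mk l).contains k then (((PySem.Dict.mk l).getD k []).length : Int) else 0)
      = (l.map (fun p => if p.1 = k then (p.2.length : Int) else 0)).sum := by
  induction l with
  | nil => simp [pysem]
  | cons p rest ih =>
    simp only [List.map_cons, List.nodup_cons] at h
    rw [List.map_cons, List.sum_cons]
    by_cases hk : p.1 = k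
    · subst hk
      rw [if_pos rfl, pv_sum_zero_of_not_mem _ _ h.1, add_zero]
      have hg : (PySem.Dict.mk ((p.1, p.2) :: rest)).get? p.1 = some p.2 := by
        rw [PySem.Dict.get?_mk_cons]; simp
      rw [if_pos (by rw [PySem.Dict.contains_eq_isSome_get?, hg]; rfl),
        PySem.Dict.getD_of_get?_eq_some _ _ hg]
    · rw [if_neg hk, zero_add]
      have hg : (PySem.Dict.mk ((p.1, p.2) :: rest)).get? k = (PySem.Dict.mk rest).get? k := by
        rw [PySem.Dict.get?_mk_cons]; simp [hk]
      rw [← ih h.2]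
      by_cases hc : (PySem.Dict.mk rest).contains k
      · rw [if_pos (by rw [PySem.Dict.contains_eq_isSome_get?, hg, ← PySem.Dict.contains_eq_isSome_get?]; exact hc), if_pos hc]
        congr 1
        simp only [PySem.Dict.getD_eq_get?_getD, hg]
      · rw [if_neg (by rw [PySem.Dict.contains_eq_isSome_get?, hg, ← PySem.Dict.contains_eq_isSome_get?]; simpa using hc), if_neg hc]

theorem pvBInner_keys (postings : List (String × List Int)) (d : PySem.Dict String Int) :
    (pvBInner d postings).keys = d.keys := by
  induction postings generalizing d with
  | nil => rfl
  | cons p rest ih =>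
    unfold pvBInner
    rw [List.foldl_cons]
    by_cases hc : d.contains p.1
    · rw [if_pos hc]
      have : (d.modify p.1 0 (fun v => v + (p.2.length : Int))).keys = d.keys := by
        rw [PySem.Dict.keys_modify, PySem.Dict.keys_insert_of_contains _ _ hc]
      rw [show (rest.foldl (fun d p => if d.contains p.1 then d.modify p.1 0 (fun v => v + (p.2.length : Int)) else d) (d.modify p.1 0 (fun v => v + (p.2.length : Int)))) = pvBInner (d.modify p.1 0 (fun v => v + (p.2.length : Int))) rest from rfl, ih, this]
    · rw [if_neg hc]
      exact ih d

theorem pv_contains_eq_of_keys_eq (d d' : PySem.Dict String Int) (h : d.keys = d'.keys) (k : String) :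
    d.contains k = d'.contains k := by
  rw [PySem.Dict.contains_eq_decide_mem_keys, PySem.Dict.contains_eq_decide_mem_keys, h]

theorem pvBInner_getD (postings : List (String × List Int)) (d : PySem.Dict String Int) (k : String) :
    (pvBInner d postings).getD k 0
      = d.getD k 0 + (if d.contains k then (postings.map (fun p => if p.1 = k then (p.2.length : Int) else 0)).sum else 0) := by
  induction postings generalizing d with
  | nil => simp [pvBInner]
  | cons p rest ih =>
    unfold pvBInner
    rw [List.foldl_cons, List.map_cons, List.sum_cons]
    by_cases hc : d.contains p.1
    · rw [if_pos hc]
      set d1 := d.modify p.1 0 (fun v => v + (p.2.length : Int)) with hd1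
      have hkeys : d1.keys = d.keys := by
        rw [hd1, PySem.Dict.keys_modify, PySem.Dict.keys_insert_of_contains _ _ hc]
      have hcont : ∀ x, d1.contains x = d.contains x := pv_contains_eq_of_keys_eq _ _ hkeys
      rw [show (rest.foldl (fun d p => if d.contains p.1 then d.modify p.1 0 (fun v => v + (p.2.length : Int)) else d) d1) = pvBInner d1 rest from rfl, ih, hcont]
      by_cases hk : k = p.1
      · subst hk
        have hv : d1.getD p.1 0 = d.getD p.1 0 + (p.2.length : Int) := by
          rw [hd1, PySem.Dict.getD_modify_self]
        rw [hv, if_pos rfl, if_pos hc, if_pos hc]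
        ring
      · have hne : ¬ (p.1 = k) := fun h => hk h.symm
        have hv : d1.getD k 0 = d.getD k 0 := by
          rw [hd1, PySem.Dict.getD_modify, if_neg hk]
        rw [hv, if_neg hne]
        split_ifs <;> ring
    · rw [if_neg hc]
      rw [show (rest.foldl (fun d p => if d.contains p.1 then d.modify p.1 0 (fun v => v + (p.2.length : Int)) else d) d) = pvBInner d rest from rfl, ih]
      by_cases hck : d.contains k
      · have hne : ¬ (p.1 = k) := fun h => hc (h ▸ hck)
        rw [if_pos hck, if_pos hck, if_neg hne, zero_add]
      · rw [if_neg hck, if_neg hck]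

theorem pvBLoop_keys (inv_indx_dict : List (String × List (String × List Int))) (qs : List String) (d : PySem.Dict String Int) :
    (qs.foldl (pvBStep inv_indx_dict) d).keys = d.keys := by
  induction qs generalizing d with
  | nil => rfl
  | cons q rest ih =>
    rw [List.foldl_cons, ih]
    unfold pvBStep
    cases (PySem.Dict.mk inv_indx_dict).get? q with
    | none => rfl
    | some postings => exact pvBInner_keys postings d

theorem pvBLoop_getD (inv_indx_dict : List (String × List (String × List Int))) (qs : List String) (d : PySem.Dict String Int) (k : String) (hk : d.contains k = true) :
    (qs.foldl (pvBStep inv_indx_dict) d).getD k 0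
      = d.getD k 0 + (qs.map (fun q => pvTermAdd inv_indx_dict q k)).sum := by
  induction qs generalizing d with
  | nil => simp
  | cons q rest ih =>
    rw [List.foldl_cons, List.map_cons, List.sum_cons]
    have hstep : (pvBStep inv_indx_dict d q).getD k 0 = d.getD k 0 + pvTermAdd inv_indx_dict q k ∧ (pvBStep inv_indx_dict d q).contains k = true := by
      unfold pvBStep pvTermAdd
      cases (PySem.Dict.mk inv_indx_dict).get? q with
      | none => exact ⟨by rw [add_zero], hk⟩
      | some postings =>
        refine ⟨?_, by rw [pv_contains_eq_of_keys_eq _ _ (pvBInner_keys postings d)]; exact hk⟩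
        rw [pvBInner_getD, if_pos hk]
    rw [ih _ hstep.2, hstep.1]
    ring

theorem pv_foldl_insert_get? (docs : List String) (f : String → Int) (d : PySem.Dict String Int) (k : String) :
    (docs.foldl (fun d x => d.insert x (f x)) d).get? k = if k ∈ docs then some (f k) else d.get? k := by
  induction docs generalizing d with
  | nil => simp
  | cons x rest ih =>
    rw [List.foldl_cons, ih]
    by_cases hr : k ∈ rest
    · rw [if_pos hr, if_pos (List.mem_cons_of_mem _ hr)]
    · rw [if_neg hr, PySem.Dict.get?_insert]
      by_cases hx : k = x
      · subst hx; simp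
      · rw [if_neg hx, if_neg (by simp [hx, hr])]

theorem pv_items_ext (d d' : PySem.Dict String Int) (hk : d.keys = d'.keys) (hnd : d.keys.Nodup) (hg : ∀ k, d.get? k = d'.get? k) : d.items = d'.items := by
  have hlen : d.items.length = d'.items.length := by
    have := congrArg List.length hk
    simpa [PySem.Dict.keys] using this
  apply List.ext_getElem hlen
  intro i h1 h2
  have hfst : d.items[i].1 = d'.items[i].1 := by
    have := congrArg (fun l => l[i]?) hk
    simp only [PySem.Dict.keys, List.getElem?_map] at this
    rw [List.getElem?_eq_getElem h1, List.getElem?_eq_getElem h2] at this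
    simpa using this
  have hmem : (d.items[i].1, d.items[i].2) ∈ d.items := by
    simpa using List.getElem_mem h1
  have hmem' : (d'.items[i].1, d'.items[i].2) ∈ d'.items := by
    simpa using List.getElem_mem h2
  have h1' := PySem.Dict.get?_of_mem_items d hmem hnd
  have h2' := PySem.Dict.get?_of_mem_items d' hmem' (hk ▸ hnd)
  rw [hg, hfst, h2'] at h1'
  have hsnd : d.items[i].2 = d'.items[i].2 := by
    injection h1' with h; exact h.symm
  exact Prod.ext hfst hsnd

-- A's per-document value equals the sum of per-term contributions
theorem pv_aVal_eq (inv_indx_dict : List (String × List (String × List Int))) (qs : List String) (doc : String)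
    (hpre : ∀ p ∈ inv_indx_dict, (p.2.map Prod.fst).Nodup) :
    (qs.foldl (fun acc q_term =>
        if (PySem.Dict.mk inv_indx_dict).contains q_term then
          (if (PySem.Dict.mk ((PySem.Dict.mk inv_indx_dict).getD q_term [])).contains doc then
            acc + (((PySem.Dict.mk ((PySem.Dict.mk inv_indx_dict).getD q_term [])).getD doc []).length : Int)
          else acc)
        else acc) 0)
      = (qs.map (fun q => pvTermAdd inv_indx_dict q doc)).sum := by
  have hbody : (fun (acc : Int) (q_term : String) =>
      if (PySem.Dict.mk inv_indx_dict).contains q_term then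
        (if (PySem.Dict.mk ((PySem.Dict.mk inv_indx_dict).getD q_term [])).contains doc then
          acc + (((PySem.Dict.mk ((PySem.Dict.mk inv_indx_dict).getD q_term [])).getD doc []).length : Int)
        else acc)
      else acc)
      = (fun (acc : Int) (q_term : String) => acc +
        (if (PySem.Dict.mk inv_indx_dict).contains q_term then
          (if (PySem.Dict.mk ((PySem.Dict.mk inv_indx_dict).getD q_term [])).contains doc then
            (((PySem.Dict.mk ((PySem.Dict.mk inv_indx_dict).getD q_term [])).getD doc []).length : Int)
          else 0)
        else 0)) := by
    funext acc q
    split_ifs <;> ring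
  rw [hbody, PySem.List.foldl_add, zero_add]
  congr 1
  apply List.map_congr_left
  intro q _
  unfold pvTermAdd
  by_cases hc : (PySem.Dict.mk inv_indx_dict).contains q
  · obtain ⟨postings, hg⟩ : ∃ v, (PySem.Dict.mk inv_indx_dict).get? q = some v := by
      rw [PySem.Dict.contains_eq_isSome_get?] at hc
      exact Option.isSome_iff_exists.mp hc
    have hmem : (q, postings) ∈ inv_indx_dict := PySem.Dict.mem_items_of_get?_eq_some _ hg
    have hnd := hpre _ hmem
    rw [if_pos hc, hg, PySem.Dict.getD_of_get?_eq_some _ _ hg]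
    exact pv_lookup_eq_sum doc postings hnd
  · rw [if_neg hc]
    have hg : (PySem.Dict.mk inv_indx_dict).get? q = none := by
      rw [PySem.Dict.contains_eq_isSome_get?] at hc
      exact Option.not_isSome_iff_eq_none.mp (by simpa using hc)
    rw [hg]

-- ===== VERDICT (by name: the statement is the Claim_ definition above) =====
theorem get_doc_frqncy_dict_spec : Claim_equal_get_doc_frqncy_dict := by
  intro inv docs qs _ hpre
  unfold Spec_get_doc_frqncy_dict get_doc_frqncy_dict get_doc_frqncy_dict_alt
  set init := docs.foldl (fun d doc_id => d.insert doc_id (0 : Int)) PySem.Dict.empty with hinit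
  set dA := docs.foldl (fun d doc_id =>
    d.insert doc_id
      (qs.foldl (fun acc q_term =>
        if (PySem.Dict.mk inv).contains q_term then
          (if (PySem.Dict.mk ((PySem.Dict.mk inv).getD q_term [])).contains doc_id then
            acc + (((PySem.Dict.mk ((PySem.Dict.mk inv).getD q_term [])).getD doc_id []).length : Int)
          else acc)
        else acc) 0)) PySem.Dict.empty with hdA
  set dB := qs.foldl (pvBStep inv) init with hdB
  have hAkeys : dA.keys = PySem.Set.ofList docs := by
    rw [hdA, PySem.Dict.keys_foldl_insert, PySem.Dict.keys_empty, PySem.Set.update_nil_left]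
  have hIkeys : init.keys = PySem.Set.ofList docs := by
    rw [hinit, PySem.Dict.keys_foldl_insert, PySem.Dict.keys_empty, PySem.Set.update_nil_left]
  have hBkeys : dB.keys = init.keys := pvBLoop_keys inv qs init
  have hkeys : dA.keys = dB.keys := by rw [hAkeys, hBkeys, hIkeys]
  have hndA : dA.keys.Nodup := by
    rw [hAkeys]; exact PySem.Set.nodup_ofList docs
  have hImem : ∀ k, k ∈ init.keys ↔ k ∈ docs := by
    intro k
    rw [hIkeys]
    exact PySem.Set.mem_ofList docs k
  refine pv_items_ext dA dB hkeys hndA ?_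
  intro k
  by_cases hmem : k ∈ docs
  · have hIget : init.get? k = some 0 := by
      rw [hinit, pv_foldl_insert_get? docs (fun _ => (0 : Int)), if_pos hmem]
    have hIcont : init.contains k = true := by
      rw [PySem.Dict.contains_eq_isSome_get?, hIget]; rfl
    have hBcont : dB.contains k = true := by
      rw [pv_contains_eq_of_keys_eq _ _ hBkeys]; exact hIcont
    obtain ⟨v, hBget⟩ : ∃ v, dB.get? k = some v := by
      rw [PySem.Dict.contains_eq_isSome_get?] at hBcont
      exact Option.isSome_iff_exists.mp hBcont
    have hBval : dB.getD k 0 = v := PySem.Dict.getD_of_get?_eq_some _ _ hBget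
    have hBsum : dB.getD k 0 = (qs.map (fun q => pvTermAdd inv q k)).sum := by
      rw [hdB, pvBLoop_getD inv qs init k hIcont,
        PySem.Dict.getD_of_get?_eq_some _ _ hIget, zero_add]
    have hAget : dA.get? k
        = some ((qs.map (fun q => pvTermAdd inv q k)).sum) := by
      rw [hdA, pv_foldl_insert_get? docs _ PySem.Dict.empty k, if_pos hmem,
        pv_aVal_eq inv qs k hpre.2]
    rw [hAget, hBget, ← hBval, hBsum]
  · have hAget : dA.get? k = none := by
      rw [PySem.Dict.get?_eq_none_iff_not_mem_keys, hAkeys]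
      rw [PySem.Set.mem_ofList]; exact hmem
    have hBget : dB.get? k = none := by
      rw [PySem.Dict.get?_eq_none_iff_not_mem_keys, hBkeys]
      rw [hImem]; exact hmem
    rw [hAget, hBget]
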